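-- pv_equiv track=rewrite | github.com/anight/adventofcode | 2020/day24/run.py | next_coord
-- ===== SOURCE A (Python) =====
-- def next_coord(coord, line):
-- 	if line == '':
-- 		return coord
-- 	if coord[0] % 2 == 0:
-- 		if line.startswith('se'):
-- 			return next_coord((coord[0]+1, coord[1]), line[2:])
-- 		if line.startswith('e'):
-- 			return next_coord((coord[0], coord[1]+1), line[1:])
-- 		if line.startswith('ne'):
-- 			return next_coord((coord[0]-1, coord[1]), line[2:])
-- 		if line.startswith('nw'):
-- 			return next_coord((coord[0]-1, coord[1]-1), line[2:])
-- 		if line.startswith('w'):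
-- 			return next_coord((coord[0], coord[1]-1), line[1:])
-- 		if line.startswith('sw'):
-- 			return next_coord((coord[0]+1, coord[1]-1), line[2:])
-- 	else:
-- 		if line.startswith('se'):
-- 			return next_coord((coord[0]+1, coord[1]+1), line[2:])
-- 		if line.startswith('e'):
-- 			return next_coord((coord[0], coord[1]+1), line[1:])
-- 		if line.startswith('ne'):
-- 			return next_coord((coord[0]-1, coord[1]+1), line[2:])
-- 		if line.startswith('nw'):
-- 			return next_coord((coord[0]-1, coord[1]), line[2:])
-- 		if line.startswith('w'):
-- 			return next_coord((coord[0], coord[1]-1), line[1:])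
-- 		if line.startswith('sw'):
-- 			return next_coord((coord[0]+1, coord[1]), line[2:])
-- 	raise Exception("can't decode \"{}\"".format(line))
-- ===== SOURCE B (Python) =====
-- # B: iterative single pass with a (parity, token) -> delta table; simpler decomposition than A's
-- # per-parity startswith chains.
-- _DELTAS = {
--     (0, 'e'): (0, 1), (0, 'w'): (0, -1),
--     (0, 'se'): (1, 0), (0, 'sw'): (1, -1),
--     (0, 'ne'): (-1, 0), (0, 'nw'): (-1, -1),
--     (1, 'e'): (0, 1), (1, 'w'): (0, -1),
--     (1, 'se'): (1, 1), (1, 'sw'): (1, 0),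
--     (1, 'ne'): (-1, 1), (1, 'nw'): (-1, 0),
-- }
--
-- def next_coord(coord, line):
--     i = 0
--     while i < len(line):
--         tok = line[i] if line[i] in 'ew' else line[i:i+2]
--         d = _DELTAS.get((coord[0] % 2, tok))
--         if d is None:
--             raise Exception("can't decode \"{}\"".format(line[i:]))
--         coord = (coord[0] + d[0], coord[1] + d[1])
--         i += len(tok)
--     return coord
-- ===== Notes on version B (the rewrite author's own statement) =====
-- stated objective: simpler
-- what changed: Replaced A's recursion with two six-way startswith chains (one per row parity) by a single iterative loop over an index that looks each 1- or 2-char token up in one (parity, token) -> delta table.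
import Mathlib
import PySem

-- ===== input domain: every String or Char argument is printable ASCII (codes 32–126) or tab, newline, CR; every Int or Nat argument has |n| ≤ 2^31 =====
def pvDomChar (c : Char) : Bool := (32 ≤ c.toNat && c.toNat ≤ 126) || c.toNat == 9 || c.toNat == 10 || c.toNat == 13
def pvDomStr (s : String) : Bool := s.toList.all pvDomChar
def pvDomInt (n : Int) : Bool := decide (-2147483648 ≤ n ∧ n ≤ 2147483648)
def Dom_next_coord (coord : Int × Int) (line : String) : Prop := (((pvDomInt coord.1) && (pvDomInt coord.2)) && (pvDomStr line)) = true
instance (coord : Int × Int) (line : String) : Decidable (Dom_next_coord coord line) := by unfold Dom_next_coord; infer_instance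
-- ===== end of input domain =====

-- B replaces A's per-parity startswith chains with one loop over a (parity, token) → delta table (objective: simpler).

-- ===== PORT A =====
-- A's recursion, on line.toList (line[k:] for k ≥ 0 is cs.drop k, exact per PySem.List.slice_from).
-- The final 'raise Exception' returns coord; those inputs are excluded by Pre_next_coord.
def nextCoordA (coord : Int × Int) (cs : List Char) : Int × Int :=
  if h : cs = [] then coord
  else if PySem.Int.mod coord.1 2 = 0 then
    if PySem.Chars.startswith cs ['s','e'] then nextCoordA (coord.1 + 1, coord.2) (cs.drop 2)
    else if PySem.Chars.startswith cs ['e'] then nextCoordA (coord.1, coord.2 + 1) (cs.drop 1)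
    else if PySem.Chars.startswith cs ['n','e'] then nextCoordA (coord.1 - 1, coord.2) (cs.drop 2)
    else if PySem.Chars.startswith cs ['n','w'] then nextCoordA (coord.1 - 1, coord.2 - 1) (cs.drop 2)
    else if PySem.Chars.startswith cs ['w'] then nextCoordA (coord.1, coord.2 - 1) (cs.drop 1)
    else if PySem.Chars.startswith cs ['s','w'] then nextCoordA (coord.1 + 1, coord.2 - 1) (cs.drop 2)
    else coord
  else
    if PySem.Chars.startswith cs ['s','e'] then nextCoordA (coord.1 + 1, coord.2 + 1) (cs.drop 2)
    else if PySem.Chars.startswith cs ['e'] then nextCoordA (coord.1, coord.2 + 1) (cs.drop 1)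
    else if PySem.Chars.startswith cs ['n','e'] then nextCoordA (coord.1 - 1, coord.2 + 1) (cs.drop 2)
    else if PySem.Chars.startswith cs ['n','w'] then nextCoordA (coord.1 - 1, coord.2) (cs.drop 2)
    else if PySem.Chars.startswith cs ['w'] then nextCoordA (coord.1, coord.2 - 1) (cs.drop 1)
    else if PySem.Chars.startswith cs ['s','w'] then nextCoordA (coord.1 + 1, coord.2) (cs.drop 2)
    else coord
termination_by cs.length
decreasing_by all_goals (have := List.length_pos_iff.mpr h; simp [List.length_drop]; omega)

def next_coord (coord : Int × Int) (line : String) : Int × Int :=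
  nextCoordA coord line.toList

-- ===== PORT B =====
-- B's (parity, token) → delta table.
def bDeltas : PySem.Dict (Int × List Char) (Int × Int) :=
  PySem.Dict.ofList
    [((0, ['e']), (0, 1)), ((0, ['w']), (0, -1)),
     ((0, ['s','e']), (1, 0)), ((0, ['s','w']), (1, -1)),
     ((0, ['n','e']), (-1, 0)), ((0, ['n','w']), (-1, -1)),
     ((1, ['e']), (0, 1)), ((1, ['w']), (0, -1)),
     ((1, ['s','e']), (1, 1)), ((1, ['s','w']), (1, 0)),
     ((1, ['n','e']), (-1, 1)), ((1, ['n','w']), (-1, 0))]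

-- B's while loop as the structural recursion consuming the decoded token each step:
-- tok is 1 char for 'e'/'w', else line[i:i+2]; a failed table lookup is Python's raise
-- (returns coord here; excluded by Pre_next_coord).
def nextCoordB (coord : Int × Int) (cs : List Char) : Int × Int :=
  match cs with
  | [] => coord
  | c :: rest =>
    if c = 'e' ∨ c = 'w' then
      match PySem.Dict.get? bDeltas (PySem.Int.mod coord.1 2, [c]) with
      | none => coord
      | some d => nextCoordB (coord.1 + d.1, coord.2 + d.2) rest
    else
      match PySem.Dict.get? bDeltas (PySem.Int.mod coord.1 2, (c :: rest).take 2) with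
      | none => coord
      | some d => nextCoordB (coord.1 + d.1, coord.2 + d.2) ((c :: rest).drop 2)
termination_by cs.length
decreasing_by all_goals simp

def next_coord_alt (coord : Int × Int) (line : String) : Int × Int :=
  nextCoordB coord line.toList

-- ===== PRECONDITION & SPEC =====
-- Pre_ excludes exactly the lines on which A raises Exception ("can't decode"): a line is
-- admitted iff it is a sequence of the six hex-direction tokens e/w/se/sw/ne/nw.
def pvValid : List Char → Bool
  | [] => true
  | 'e' :: r => pvValid r
  | 'w' :: r => pvValid r
  | 's' :: 'e' :: r => pvValid r
  | 's' :: 'w' :: r => pvValid r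
  | 'n' :: 'e' :: r => pvValid r
  | 'n' :: 'w' :: r => pvValid r
  | _ => false

def Pre_next_coord (coord : Int × Int) (line : String) : Prop := pvValid line.toList = true
instance (coord : Int × Int) (line : String) : Decidable (Pre_next_coord coord line) := by
  unfold Pre_next_coord; infer_instance

def pvWitness_next_coord : (Int × Int) × String := ((0, 0), "senwesw")

def Spec_next_coord (coord : Int × Int) (line : String) (out : Int × Int) : Prop := out = next_coord_alt coord line
instance (coord : Int × Int) (line : String) (out : Int × Int) : Decidable (Spec_next_coord coord line out) := by unfold Spec_next_coord; infer_instance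

-- ===== CLAIM (what is proved, stated in full; the proofs are below) =====
def Claim_equal_next_coord : Prop := ∀ (coord : Int × Int) (line : String), Dom_next_coord coord line → Pre_next_coord coord line → Spec_next_coord coord line (next_coord coord line)

-- ===== LEMMAS AND PROOFS =====
lemma nextCoordA_eq_nextCoordB (cs : List Char) (coord : Int × Int)
    (h : pvValid cs = true) : nextCoordA coord cs = nextCoordB coord cs := by
  induction cs using pvValid.induct generalizing coord with
  | case1 => simp [nextCoordA, nextCoordB]
  | case2 r ih =>
      have hr : pvValid r = true := by simpa [pvValid] using h
      rw [nextCoordA, nextCoordB]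
      rcases PySem.Int.mod_two_eq coord.1 with hp | hp <;> rw [hp] <;>
        simp [PySem.Chars.startswith, List.isPrefixOf,
          (by decide : PySem.Dict.get? bDeltas (0, ['e']) = some ((0:Int), (1:Int))),
          (by decide : PySem.Dict.get? bDeltas (1, ['e']) = some ((0:Int), (1:Int)))] <;>
        exact ih _ hr
  | case3 r ih =>
      have hr : pvValid r = true := by simpa [pvValid] using h
      rw [nextCoordA, nextCoordB]
      rcases PySem.Int.mod_two_eq coord.1 with hp | hp <;> rw [hp] <;>
        simp [PySem.Chars.startswith, List.isPrefixOf,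
          (by decide : PySem.Dict.get? bDeltas (0, ['w']) = some ((0:Int), (-1:Int))),
          (by decide : PySem.Dict.get? bDeltas (1, ['w']) = some ((0:Int), (-1:Int)))] <;>
        exact ih _ hr
  | case4 r ih =>
      have hr : pvValid r = true := by simpa [pvValid] using h
      rw [nextCoordA, nextCoordB]
      rcases PySem.Int.mod_two_eq coord.1 with hp | hp <;> rw [hp] <;>
        simp [PySem.Chars.startswith, List.isPrefixOf,
          (by decide : PySem.Dict.get? bDeltas (0, ['s', 'e']) = some ((1:Int), (0:Int))),
          (by decide : PySem.Dict.get? bDeltas (1, ['s', 'e']) = some ((1:Int), (1:Int)))] <;>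
        exact ih _ hr
  | case5 r ih =>
      have hr : pvValid r = true := by simpa [pvValid] using h
      rw [nextCoordA, nextCoordB]
      rcases PySem.Int.mod_two_eq coord.1 with hp | hp <;> rw [hp] <;>
        simp [PySem.Chars.startswith, List.isPrefixOf,
          (by decide : PySem.Dict.get? bDeltas (0, ['s', 'w']) = some ((1:Int), (-1:Int))),
          (by decide : PySem.Dict.get? bDeltas (1, ['s', 'w']) = some ((1:Int), (0:Int)))] <;>
        exact ih _ hr
  | case6 r ih =>
      have hr : pvValid r = true := by simpa [pvValid] using h
      rw [nextCoordA, nextCoordB]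
      rcases PySem.Int.mod_two_eq coord.1 with hp | hp <;> rw [hp] <;>
        simp [PySem.Chars.startswith, List.isPrefixOf,
          (by decide : PySem.Dict.get? bDeltas (0, ['n', 'e']) = some ((-1:Int), (0:Int))),
          (by decide : PySem.Dict.get? bDeltas (1, ['n', 'e']) = some ((-1:Int), (1:Int)))] <;>
        exact ih _ hr
  | case7 r ih =>
      have hr : pvValid r = true := by simpa [pvValid] using h
      rw [nextCoordA, nextCoordB]
      rcases PySem.Int.mod_two_eq coord.1 with hp | hp <;> rw [hp] <;>
        simp [PySem.Chars.startswith, List.isPrefixOf,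
          (by decide : PySem.Dict.get? bDeltas (0, ['n', 'w']) = some ((-1:Int), (-1:Int))),
          (by decide : PySem.Dict.get? bDeltas (1, ['n', 'w']) = some ((-1:Int), (0:Int)))] <;>
        exact ih _ hr
  | case8 => simp [pvValid] at h

-- ===== VERDICT (by name: the statement is the Claim_ definition above) =====
theorem next_coord_spec : Claim_equal_next_coord := by
  intro coord line _ hpre
  unfold Spec_next_coord next_coord next_coord_alt
  exact nextCoordA_eq_nextCoordB line.toList coord hpre
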